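-- pv_equiv track=rewrite | github.com/sagol-python-for-neuroscientists/course_site_2024 | assignments/assignment1/hw1_question1.py | _three_pairs_in_a_row
-- ===== SOURCE A (Python) =====
-- def _three_pairs_in_a_row(firsts, seconds):
--     """Iterate over pairs of letters, counting the number of consecutrive
--     pairs and returning True if we have three in a row.
--
--     Parameters
--     ----------
--     firsts, seconds : str
--         Strings to iterate and compare over.
--
--     Returns
--     -------
--     value : bool
--         True if input contained three consecutive double-letter pairs,
--         False otherwise.
--     """
--     num_pairs = 0
--     for first, second in zip(firsts, seconds):
--         if first == second:
--             num_pairs += 1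
--             if num_pairs == 3:
--                 return True
--         else:
--             num_pairs = 0
--     return False
-- ===== SOURCE B (Python) =====
-- from itertools import groupby
--
-- def _three_pairs_in_a_row(firsts, seconds):
--     matches = [a == b for a, b in zip(firsts, seconds)]
--     return any(key and sum(1 for _ in grp) >= 3 for key, grp in groupby(matches))
-- ===== Notes on version B (the rewrite author's own statement) =====
-- stated objective: alternative
-- what changed: Replaces the inline reset-on-mismatch counter with a build-then-group decomposition: compute the per-position equality list, group it with itertools.groupby, and test for a True group of length >= 3.
import Mathlib
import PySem

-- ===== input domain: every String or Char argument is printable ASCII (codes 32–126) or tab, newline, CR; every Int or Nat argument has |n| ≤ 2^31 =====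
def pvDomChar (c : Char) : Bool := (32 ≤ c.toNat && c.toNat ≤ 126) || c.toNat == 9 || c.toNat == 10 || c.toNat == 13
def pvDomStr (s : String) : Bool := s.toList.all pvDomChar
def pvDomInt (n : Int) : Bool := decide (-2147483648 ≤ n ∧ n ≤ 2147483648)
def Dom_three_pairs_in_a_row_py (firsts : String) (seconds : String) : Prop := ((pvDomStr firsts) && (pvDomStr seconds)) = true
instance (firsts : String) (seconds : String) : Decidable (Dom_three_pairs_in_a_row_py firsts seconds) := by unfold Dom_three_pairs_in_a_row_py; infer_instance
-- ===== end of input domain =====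

-- ===== PORT A =====
-- B replaces A's reset-on-mismatch counter by a build-then-group decomposition (same cost).
-- A's loop: counter of consecutive equal pairs over zip(firsts, seconds), early True at 3.
def pvHasALoop : List (Char × Char) → Nat → Bool
  | [], _ => false
  | (f, s) :: rest, numPairs =>
    if f == s then
      if numPairs + 1 = 3 then true else pvHasALoop rest (numPairs + 1)
    else
      pvHasALoop rest 0

def three_pairs_in_a_row_py (firsts : String) (seconds : String) : Bool :=
  pvHasALoop (List.zip firsts.toList seconds.toList) 0

-- ===== PORT B =====
-- itertools.groupby over the matches list: runs of equal booleans with their lengths.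
def pvGroupGo (key : Bool) (n : Nat) : List Bool → List (Bool × Nat)
  | [] => [(key, n)]
  | c :: rest => if c == key then pvGroupGo key (n + 1) rest else (key, n) :: pvGroupGo c 1 rest

def pvGroupBy : List Bool → List (Bool × Nat)
  | [] => []
  | b :: rest => pvGroupGo b 1 rest

def three_pairs_in_a_row_py_alt (firsts : String) (seconds : String) : Bool :=
  let ms := (List.zip firsts.toList seconds.toList).map (fun p => p.1 == p.2)
  (pvGroupBy ms).any (fun g => g.1 && decide (3 ≤ g.2))

-- ===== PRECONDITION & SPEC =====
def Spec_three_pairs_in_a_row_py (firsts : String) (seconds : String) (out : Bool) : Prop := out = three_pairs_in_a_row_py_alt firsts seconds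
instance (firsts : String) (seconds : String) (out : Bool) : Decidable (Spec_three_pairs_in_a_row_py firsts seconds out) := by unfold Spec_three_pairs_in_a_row_py; infer_instance

-- ===== CLAIM (what is proved, stated in full; the proofs are below) =====
def Claim_equal_three_pairs_in_a_row_py : Prop := ∀ (firsts : String) (seconds : String), Dom_three_pairs_in_a_row_py firsts seconds → Spec_three_pairs_in_a_row_py firsts seconds (three_pairs_in_a_row_py firsts seconds)

-- ===== LEMMAS AND PROOFS =====
-- A's loop over the pair list equals the same loop over the boolean matches list.
def pvHasB : List Bool → Nat → Bool
  | [], _ => false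
  | m :: rest, numPairs =>
    if m then
      if numPairs + 1 = 3 then true else pvHasB rest (numPairs + 1)
    else
      pvHasB rest 0

theorem pvHasALoop_eq_hasB (l : List (Char × Char)) (k : Nat) :
    pvHasALoop l k = pvHasB (l.map (fun p => p.1 == p.2)) k := by
  induction l generalizing k with
  | nil => rfl
  | cons p rest ih =>
    obtain ⟨f, s⟩ := p
    simp only [pvHasALoop, pvHasB, List.map]
    by_cases h : (f == s) = true
    · simp [h, ih]
    · simp [h, ih]

-- key lemma: scanning the groups built by pvGroupGo for a true-run of length ≥ 3
-- equals resuming A's counter loop.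
theorem pvGroupGo_spec (l : List Bool) (b : Bool) (n : Nat) :
    (pvGroupGo b n l).any (fun g => g.1 && decide (3 ≤ g.2)) =
      (if b && decide (3 ≤ n) then true else if b then pvHasB l n else pvHasB l 0) := by
  induction l generalizing b n with
  | nil =>
    cases b <;> simp [pvGroupGo, pvHasB]
  | cons c rest ih =>
    simp only [pvGroupGo]
    by_cases hc : (c == b) = true
    · have hb : c = b := by simpa using hc
      subst hb
      rw [if_pos (by simp)]
      rw [ih]
      cases c with
      | false => simp [pvHasB]
      | true =>
        simp only [Bool.true_and, pvHasB, if_pos rfl]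
        by_cases h3 : 3 ≤ n
        · simp [h3, Nat.le_succ_of_le h3]
        · by_cases h2 : n + 1 = 3
          · simp [h3, h2, h2 ▸ le_refl 3]
          · have : ¬ 3 ≤ n + 1 := by omega
            simp [h3, h2, this]
    · have hb : c = !b := by
        cases c <;> cases b <;> simp_all
      subst hb
      rw [if_neg (by simp)]
      simp only [List.any_cons, ih]
      cases b with
      | false =>
        simp [pvHasB]
      | true =>
        simp only [Bool.not_true, Bool.false_and, Bool.and_false, if_false,
          Bool.true_and, pvHasB, if_neg (Bool.false_ne_true), Bool.false_or]
        by_cases h3 : 3 ≤ n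
        · simp [h3]
        · simp [h3]

theorem pvMain (l : List Bool) :
    (pvGroupBy l).any (fun g => g.1 && decide (3 ≤ g.2)) = pvHasB l 0 := by
  cases l with
  | nil => rfl
  | cons b rest =>
    simp only [pvGroupBy, pvGroupGo_spec]
    cases b with
    | false => simp [pvHasB]
    | true => simp [pvHasB]

-- ===== VERDICT (by name: the statement is the Claim_ definition above) =====
theorem three_pairs_in_a_row_py_spec : Claim_equal_three_pairs_in_a_row_py := by
  intro firsts seconds _
  unfold Spec_three_pairs_in_a_row_py three_pairs_in_a_row_py three_pairs_in_a_row_py_alt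
  rw [pvHasALoop_eq_hasB, pvMain]
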